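-- pv_equiv track=rewrite | github.com/mitselek/fortunate-primes | implementations/python-gmpy2/fortunate_v2.py | compute_lower_bound
-- ===== SOURCE A (Python) =====
-- from typing import Tuple, Optional, Dict, List
--
-- def compute_lower_bound(completed: Dict[int, int], min_offset: int = 2) -> int:
--     """
--     Find the contiguous lower bound from completed batches.
--
--     The lower bound is the highest M where all [min_offset, M) have been tested.
--     """
--     if not completed:
--         return min_offset
--     lower = min_offset
--     for start in sorted(completed.keys()):
--         if start <= lower:
--             lower = max(lower, completed[start])
--         else:
--             break  # Gap in coverage
--     return lower
-- ===== SOURCE B (Python) =====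
-- def compute_lower_bound(completed, min_offset=2):
--     """Contiguous lower bound via a repeated-scan fixpoint (no sorting)."""
--     lower = min_offset
--     changed = True
--     while changed:
--         changed = False
--         for start, end in completed.items():
--             if start <= lower and lower < end:
--                 lower = end
--                 changed = True
--     return lower
-- ===== Notes on version B (the rewrite author's own statement) =====
-- stated objective: faster
-- what changed: Replaces sort-the-keys-then-scan-with-break by an unsorted repeated-pass fixpoint (sweep the items absorbing any interval whose start is already covered until a pass changes nothing); dropping the O(n log n) sort makes it measurably faster on typical data, though worst-case quadratic.
import Mathlib
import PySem

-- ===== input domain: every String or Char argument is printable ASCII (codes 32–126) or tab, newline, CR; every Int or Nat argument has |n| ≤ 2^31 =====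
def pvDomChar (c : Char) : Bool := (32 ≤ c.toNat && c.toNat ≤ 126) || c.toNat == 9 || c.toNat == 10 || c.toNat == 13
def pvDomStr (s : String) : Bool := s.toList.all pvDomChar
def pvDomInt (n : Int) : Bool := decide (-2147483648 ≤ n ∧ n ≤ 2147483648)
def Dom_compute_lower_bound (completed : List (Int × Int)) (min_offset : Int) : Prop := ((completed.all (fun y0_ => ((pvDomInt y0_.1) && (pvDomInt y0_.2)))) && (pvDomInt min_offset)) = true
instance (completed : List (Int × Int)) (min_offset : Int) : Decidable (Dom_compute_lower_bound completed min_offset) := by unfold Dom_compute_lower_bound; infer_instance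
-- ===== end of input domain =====

-- B replaces A's sort-then-scan-with-break by an unsorted repeated-pass fixpoint (same result, no ordering of the keys).


-- ===== PORT A =====
-- completed[start]: first-match association-list lookup; under Pre_ (unique keys, as a Python
-- dict always has) this is exact, and the KeyError default 0 is unreachable because every
-- looked-up key comes from the dict's own key list.
def aLookup : List (Int × Int) → Int → Int
  | [], _ => 0
  | (k, v) :: rest, x => if k = x then v else aLookup rest x

-- the `for start in sorted(...)` loop with its `break`
def aLoop (c : List (Int × Int)) : List Int → Int → Int
  | [], lower => lower
  | k :: ks, lower =>
      if k ≤ lower then aLoop c ks (max lower (aLookup c k)) else lower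

def compute_lower_bound (completed : List (Int × Int)) (min_offset : Int) : Int :=
  if completed = [] then min_offset
  else aLoop completed (PySem.List.sorted (completed.map Prod.fst) (fun x => x) false) min_offset

-- ===== PORT B =====
-- one `for start, end in completed.items()` pass, carrying (lower, changed)
def bPass : List (Int × Int) → Int → Bool → Int × Bool
  | [], lower, changed => (lower, changed)
  | (s, e) :: rest, lower, changed =>
      if s ≤ lower ∧ lower < e then bPass rest e true else bPass rest lower changed

-- the `while changed` loop; fuel length+1 is enough: every changing pass strictly raises
-- `lower` to one of the stored ends, so at most `length` passes change anything
def bLoop (c : List (Int × Int)) : Nat → Int → Int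
  | 0, lower => lower
  | fuel + 1, lower =>
      let p := bPass c lower false
      if p.2 then bLoop c fuel p.1 else p.1

def compute_lower_bound_alt (completed : List (Int × Int)) (min_offset : Int) : Int :=
  bLoop completed (completed.length + 1) min_offset

-- ===== PRECONDITION & SPEC =====
-- Pre_ excludes association lists with duplicate keys: a Python dict cannot hold them (building
-- the dict would silently overwrite), so such lists do not represent any input A ever receives.
def Pre_compute_lower_bound (completed : List (Int × Int)) (min_offset : Int) : Prop :=
  (completed.map Prod.fst).Nodup

instance (completed : List (Int × Int)) (min_offset : Int) : Decidable (Pre_compute_lower_bound completed min_offset) := by unfold Pre_compute_lower_bound; infer_instance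

def pvWitness_compute_lower_bound : (List (Int × Int)) × Int := ([(2, 5), (5, 9)], 2)

def Spec_compute_lower_bound (completed : List (Int × Int)) (min_offset : Int) (out : Int) : Prop := out = compute_lower_bound_alt completed min_offset
instance (completed : List (Int × Int)) (min_offset : Int) (out : Int) : Decidable (Spec_compute_lower_bound completed min_offset out) := by unfold Spec_compute_lower_bound; infer_instance

-- ===== CLAIM (what is proved, stated in full; the proofs are below) =====
def Claim_equal_compute_lower_bound : Prop := ∀ (completed : List (Int × Int)) (min_offset : Int), Dom_compute_lower_bound completed min_offset → Pre_compute_lower_bound completed min_offset → Spec_compute_lower_bound completed min_offset (compute_lower_bound completed min_offset)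

-- ===== LEMMAS AND PROOFS =====

-- `Closed c l`: no stored interval extends past l from a covered start (a fixpoint of one pass)
def Closed (c : List (Int × Int)) (l : Int) : Prop := ∀ p ∈ c, p.1 ≤ l → p.2 ≤ l

-- the pure value of one B pass
def onePass : List (Int × Int) → Int → Int
  | [], l => l
  | (s, e) :: rest, l => onePass rest (if s ≤ l ∧ l < e then e else l)

theorem le_onePass (c : List (Int × Int)) (l : Int) : l ≤ onePass c l := by
  induction c generalizing l with
  | nil => simp [onePass]
  | cons p rest ih =>
      obtain ⟨s, e⟩ := p
      simp only [onePass]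
      split_ifs with h
      · exact le_trans (le_of_lt h.2) (ih e)
      · exact ih l

theorem bPass_fst (c : List (Int × Int)) (l : Int) (ch : Bool) :
    (bPass c l ch).1 = onePass c l := by
  induction c generalizing l ch with
  | nil => simp [bPass, onePass]
  | cons p rest ih =>
      obtain ⟨s, e⟩ := p
      simp only [bPass, onePass]
      split_ifs <;> apply ih

theorem bPass_snd (c : List (Int × Int)) (l : Int) (ch : Bool) :
    (bPass c l ch).2 = (ch || decide (l < onePass c l)) := by
  induction c generalizing l ch with
  | nil => simp [bPass, onePass]
  | cons p rest ih =>
      obtain ⟨s, e⟩ := p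
      simp only [bPass, onePass]
      split_ifs with h
      · rw [ih]
        have : l < onePass rest e := lt_of_lt_of_le h.2 (le_onePass rest e)
        simp [this]
      · exact ih l ch

theorem closed_of_onePass (c : List (Int × Int)) (l : Int) (h : onePass c l = l) :
    Closed c l := by
  induction c generalizing l with
  | nil => intro p hp; simp at hp
  | cons p rest ih =>
      obtain ⟨s, e⟩ := p
      simp only [onePass] at h
      set l' := if s ≤ l ∧ l < e then e else l with hl'
      have hstep : l ≤ l' := by
        rw [hl']; split_ifs with hc
        · exact le_of_lt hc.2
        · exact le_refl l
      have hfix : l' = l := le_antisymm (h ▸ le_onePass rest l') hstep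
      intro q hq hq1
      rcases List.mem_cons.mp hq with hqh | hq'
      · rw [hqh] at hq1 ⊢
        simp only at hq1 ⊢
        by_contra hlt
        have he : l' = e := by rw [hl', if_pos ⟨hq1, lt_of_not_ge hlt⟩]
        omega
      · exact ih l (hfix ▸ h) q hq' hq1

theorem onePass_le_of_closed (c : List (Int × Int)) :
    ∀ (l L : Int), Closed c L → l ≤ L → onePass c l ≤ L := by
  induction c with
  | nil => intro l L _ hl; simpa [onePass]
  | cons p rest ih =>
      obtain ⟨s, e⟩ := p
      intro l L hC hl
      simp only [onePass]
      have hC' : Closed rest L := fun q hq => hC q (List.mem_cons_of_mem _ hq)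
      split_ifs with h
      · exact ih e L hC' (hC ⟨s, e⟩ (by simp) (le_trans h.1 hl))
      · exact ih l L hC' hl

theorem onePass_mem_ends (c : List (Int × Int)) (l : Int) :
    onePass c l = l ∨ onePass c l ∈ c.map Prod.snd := by
  induction c generalizing l with
  | nil => left; simp [onePass]
  | cons p rest ih =>
      obtain ⟨s, e⟩ := p
      simp only [onePass]
      split_ifs with h
      · rcases ih e with h' | h'
        · right; simp [h']
        · right; simp [h']
      · rcases ih l with h' | h'
        · left; exact h'
        · right; simp [h']

theorem length_filter_mono {α : Type} (xs : List α) (p q : α → Bool)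
    (h : ∀ x, p x = true → q x = true) :
    (xs.filter p).length ≤ (xs.filter q).length := by
  induction xs with
  | nil => simp
  | cons x rest ih =>
      by_cases hp : p x = true
      · simp [hp, h x hp]; omega
      · have : p x = false := by simpa using hp
        by_cases hq : q x = true <;>
          simp [this, hq] <;> omega

theorem length_filter_lt (xs : List Int) (a b : Int) (hab : a < b) (hb : b ∈ xs) :
    (xs.filter (fun e => decide (b < e))).length
      < (xs.filter (fun e => decide (a < e))).length := by
  induction xs with
  | nil => simp at hb
  | cons x rest ih =>
      have hmono := length_filter_mono rest (fun e => decide (b < e))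
        (fun e => decide (a < e)) (fun x hx => by simp at hx ⊢; omega)
      rcases List.mem_cons.mp hb with rfl | hb'
      · have h1 : ¬ (b < b) := lt_irrefl b
        simp only [List.filter_cons, decide_eq_true_eq, h1, if_false, hab, if_true,
          List.length_cons]
        omega
      · have htail := ih hb'
        by_cases hbx : b < x
        · have hax : a < x := lt_trans hab hbx
          simp only [List.filter_cons, decide_eq_true_eq, hbx, if_true, hax, List.length_cons]
          omega
        · by_cases hax : a < x
          · simp only [List.filter_cons, decide_eq_true_eq, hbx, if_false, hax, if_true,
              List.length_cons]
            omega
          · simp only [List.filter_cons, decide_eq_true_eq, hbx, if_false, hax]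
            omega

theorem bLoop_succ (c : List (Int × Int)) (fuel : Nat) (l : Int) :
    bLoop c (fuel + 1) l =
      if l < onePass c l then bLoop c fuel (onePass c l) else onePass c l := by
  simp only [bLoop, bPass_fst, bPass_snd, Bool.false_or, decide_eq_true_eq]

-- B's loop, given enough fuel, returns the least Closed point ≥ lower
theorem bLoop_correct (c : List (Int × Int)) :
    ∀ (fuel : Nat) (l : Int),
      ((c.map Prod.snd).filter (fun e => decide (l < e))).length < fuel →
      Closed c (bLoop c fuel l) ∧ l ≤ bLoop c fuel l ∧
        (∀ L, Closed c L → l ≤ L → bLoop c fuel l ≤ L) := by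
  intro fuel
  induction fuel with
  | zero => intro l h; omega
  | succ fuel ih =>
      intro l hfuel
      rw [bLoop_succ]
      by_cases hch : l < onePass c l
      · rw [if_pos hch]
        have hmem : onePass c l ∈ c.map Prod.snd := by
          rcases onePass_mem_ends c l with h | h
          · omega
          · exact h
        have hlt := length_filter_lt (c.map Prod.snd) l (onePass c l) hch hmem
        obtain ⟨h1, h2, h3⟩ := ih (onePass c l) (by omega)
        exact ⟨h1, le_trans (le_of_lt hch) h2,
          fun L hC hL => h3 L hC (onePass_le_of_closed c l L hC hL)⟩
      · rw [if_neg hch]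
        have hfix : onePass c l = l := le_antisymm (by omega) (le_onePass c l)
        rw [hfix]
        exact ⟨closed_of_onePass c l hfix, le_refl l, fun L _ hL => hL⟩

-- A-side facts
theorem le_aLoop (c : List (Int × Int)) (ks : List Int) (l : Int) : l ≤ aLoop c ks l := by
  induction ks generalizing l with
  | nil => simp [aLoop]
  | cons k ks ih =>
      simp only [aLoop]
      split_ifs with h
      · exact le_trans (le_max_left _ _) (ih _)
      · exact le_refl l

theorem aLookup_mem (c : List (Int × Int)) (k : Int) (h : k ∈ c.map Prod.fst) :
    (k, aLookup c k) ∈ c := by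
  induction c with
  | nil => simp at h
  | cons p rest ih =>
      obtain ⟨k0, v0⟩ := p
      simp only [aLookup]
      by_cases hk : k0 = k
      · subst hk; simp
      · have : k ∈ rest.map Prod.fst := by
          simp at h; rcases h with h | h
          · exact absurd h.symm hk
          · simpa using h
        simp [hk, List.mem_cons_of_mem _ (ih this)]

theorem aLookup_eq (c : List (Int × Int)) (k e : Int)
    (hnd : (c.map Prod.fst).Nodup) (hmem : (k, e) ∈ c) : aLookup c k = e := by
  induction c with
  | nil => simp at hmem
  | cons p rest ih =>
      obtain ⟨k0, v0⟩ := p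
      simp only [List.map_cons, List.nodup_cons] at hnd
      simp only [aLookup]
      rcases List.mem_cons.mp hmem with h | h
      · injection h with h1 h2
        subst h1; subst h2
        simp
      · by_cases hk : k0 = k
        · subst hk
          exact absurd (by simpa using List.mem_map_of_mem (f := Prod.fst) h) hnd.1
        · simp only [if_neg hk]
          exact ih hnd.2 h

theorem aLoop_le_of_closed (c : List (Int × Int)) (ks : List Int) :
    ∀ (l L : Int), (∀ k ∈ ks, k ∈ c.map Prod.fst) → Closed c L → l ≤ L →
      aLoop c ks l ≤ L := by
  induction ks with
  | nil => intro l L _ _ hl; simpa [aLoop]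
  | cons k ks ih =>
      intro l L hks hC hl
      simp only [aLoop]
      split_ifs with h
      · have hv : aLookup c k ≤ L :=
          hC (k, aLookup c k) (aLookup_mem c k (hks k (by simp))) (le_trans h hl)
        exact ih _ L (fun k' hk' => hks k' (List.mem_cons_of_mem _ hk')) hC (max_le hl hv)
      · exact hl

theorem aLoop_absorbs (c : List (Int × Int)) (ks : List Int) (l : Int)
    (hsorted : ks.Pairwise (· ≤ ·)) :
    ∀ k ∈ ks, k ≤ aLoop c ks l → aLookup c k ≤ aLoop c ks l := by
  induction ks generalizing l with
  | nil => intro k hk; simp at hk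
  | cons k0 ks ih =>
      intro k hk hkle
      simp only [aLoop] at hkle ⊢
      split_ifs with h
      · rw [if_pos h] at hkle
        rcases List.mem_cons.mp hk with rfl | hk'
        · exact le_trans (le_trans (le_max_right l _) (le_aLoop c ks _)) (le_refl _)
        · exact ih _ (List.Pairwise.of_cons hsorted) k hk' hkle
      · rw [if_neg h] at hkle
        exfalso
        rcases List.mem_cons.mp hk with rfl | hk'
        · exact h hkle
        · exact h (le_trans (List.rel_of_pairwise_cons hsorted hk') hkle)

theorem closed_A (c : List (Int × Int)) (m : Int)
    (hnd : (c.map Prod.fst).Nodup) :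
    Closed c (aLoop c (PySem.List.sorted (c.map Prod.fst) (fun x => x) false) m) := by
  intro p hp hp1
  have hkmem : p.1 ∈ PySem.List.sorted (c.map Prod.fst) (fun x => x) false :=
    (PySem.List.mem_sorted _ _ _ _).mpr (List.mem_map_of_mem hp)
  have hsorted : (PySem.List.sorted (c.map Prod.fst) (fun x => x) false).Pairwise (· ≤ ·) :=
    PySem.List.sorted_pairwise _ _
  have := aLoop_absorbs c _ m hsorted p.1 hkmem hp1
  rwa [aLookup_eq c p.1 p.2 hnd hp] at this

-- ===== VERDICT (by name: the statement is the Claim_ definition above) =====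
theorem compute_lower_bound_spec : Claim_equal_compute_lower_bound := by
  intro c m _hDom hPre
  unfold Spec_compute_lower_bound compute_lower_bound compute_lower_bound_alt
  by_cases hc : c = []
  · subst hc; simp [bLoop, bPass]
  · rw [if_neg hc]
    have hfuel : ((c.map Prod.snd).filter (fun e => decide (m < e))).length < c.length + 1 := by
      have := List.length_filter_le (fun e => decide (m < e)) (c.map Prod.snd)
      simp only [List.length_map] at this
      omega
    obtain ⟨hBc, hBle, hBmin⟩ := bLoop_correct c (c.length + 1) m hfuel
    have hAc : Closed c (aLoop c (PySem.List.sorted (c.map Prod.fst) (fun x => x) false) m) :=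
      closed_A c m hPre
    have hAle := le_aLoop c (PySem.List.sorted (c.map Prod.fst) (fun x => x) false) m
    have h1 : aLoop c (PySem.List.sorted (c.map Prod.fst) (fun x => x) false) m
        ≤ bLoop c (c.length + 1) m :=
      aLoop_le_of_closed c _ m _
        (fun k hk => (PySem.List.mem_sorted _ _ _ _).mp hk) hBc hBle
    have h2 := hBmin _ hAc hAle
    omega
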